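-- pv_equiv track=rewrite | github.com/rpatidar/StockTrading | broker/zerodha/zeroda_base.py | _instrument_row
-- ===== SOURCE A (Python) =====
-- def _instrument_row(instruments, stock, exchange=None):
--     exchanges = [exchange] if exchange else ["NSE", "BSE"]
--     for exchange_name in exchanges:
--         for instrument_data in instruments:
--             if (
--                 instrument_data["tradingsymbol"] == stock
--                 and instrument_data["exchange"] == exchange_name
--             ):
--                 return instrument_data
--     return None
-- ===== SOURCE B (Python) =====
-- def _instrument_row(instruments, stock, exchange=None):
--     prefs = [exchange] if exchange else ["NSE", "BSE"]
--     best_rank = len(prefs)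
--     best = None
--     for row in instruments:
--         if row["tradingsymbol"] != stock:
--             continue
--         ex = row["exchange"]
--         if ex in prefs:
--             rank = prefs.index(ex)
--             if rank < best_rank:
--                 best_rank = rank
--                 best = row
--                 if rank == 0:
--                     break
--     return best
-- ===== Notes on version B (the rewrite author's own statement) =====
-- stated objective: alternative
-- what changed: B replaces A's nested loops (rescan the whole instrument list once per preferred exchange) by a single pass that keeps the earliest row of minimal preference rank, breaking early when a top-preference match is found.
import Mathlib
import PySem

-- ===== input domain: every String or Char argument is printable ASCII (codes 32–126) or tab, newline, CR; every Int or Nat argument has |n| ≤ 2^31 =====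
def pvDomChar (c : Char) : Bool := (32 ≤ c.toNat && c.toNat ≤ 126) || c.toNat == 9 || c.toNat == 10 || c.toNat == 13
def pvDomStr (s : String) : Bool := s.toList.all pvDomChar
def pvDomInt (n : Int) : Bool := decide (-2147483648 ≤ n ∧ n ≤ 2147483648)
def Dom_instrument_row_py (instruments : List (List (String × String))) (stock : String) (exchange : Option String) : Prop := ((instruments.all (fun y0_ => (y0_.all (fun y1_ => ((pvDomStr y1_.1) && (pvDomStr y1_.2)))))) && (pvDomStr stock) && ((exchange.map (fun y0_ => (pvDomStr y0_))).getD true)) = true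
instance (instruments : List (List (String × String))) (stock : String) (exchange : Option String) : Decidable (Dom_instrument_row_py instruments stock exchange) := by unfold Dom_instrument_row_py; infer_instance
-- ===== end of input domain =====

-- B replaces A's nested loops (one full rescan of the instrument list per preferred
-- exchange) by a single pass keeping the earliest row of minimal preference rank,
-- breaking early on a rank-0 match (objective: alternative).

-- Shared helpers: first-match lookup of a key in a row (Python row["k"]); outside
-- Pre_ (a row missing the key) Python raises KeyError, so the "" default there is
-- never observed on admitted inputs.
def pvRowSym (row : List (String × String)) : String :=
  (((row.find? (fun p => p.1 == "tradingsymbol")).map Prod.snd)).getD ""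

def pvRowExch (row : List (String × String)) : String :=
  (((row.find? (fun p => p.1 == "exchange")).map Prod.snd)).getD ""

-- Python truthiness of `exchange`: None and "" are falsy.
def pvExchanges (exchange : Option String) : List String :=
  match exchange with
  | some e => if e == "" then ["NSE", "BSE"] else [e]
  | none => ["NSE", "BSE"]

-- ===== PORT A =====
-- inner loop of A: scan instruments for the first row matching (stock, exName)
def pvScanRows (instruments : List (List (String × String))) (stock exName : String) :
    Option (List (String × String)) :=
  match instruments with
  | [] => none
  | row :: rest =>
      if pvRowSym row == stock && pvRowExch row == exName then some row
      else pvScanRows rest stock exName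

-- outer loop of A over the exchange preference list
def pvScanExchanges (exchanges : List String) (instruments : List (List (String × String)))
    (stock : String) : Option (List (String × String)) :=
  match exchanges with
  | [] => none
  | exName :: rest =>
      match pvScanRows instruments stock exName with
      | some row => some row
      | none => pvScanExchanges rest instruments stock

def instrument_row_py (instruments : List (List (String × String))) (stock : String)
    (exchange : Option String) : Option (List (String × String)) :=
  pvScanExchanges (pvExchanges exchange) instruments stock

-- ===== PORT B =====
-- B's single loop: `best_rank`/`best` accumulators; `ex in prefs` + `prefs.index(ex)`
-- is the match on PySem.List.index?; `break` on rank 0 is the early `some row`.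
def pvBestLoop (prefs : List String) (stock : String)
    (rows : List (List (String × String))) (bestRank : Nat)
    (best : Option (List (String × String))) : Option (List (String × String)) :=
  match rows with
  | [] => best
  | row :: rest =>
      if pvRowSym row != stock then pvBestLoop prefs stock rest bestRank best
      else
        match PySem.List.index? prefs (pvRowExch row) with
        | some rank =>
            if rank < bestRank then
              if rank == 0 then some row
              else pvBestLoop prefs stock rest rank (some row)
            else pvBestLoop prefs stock rest bestRank best
        | none => pvBestLoop prefs stock rest bestRank best

def instrument_row_py_alt (instruments : List (List (String × String))) (stock : String)
    (exchange : Option String) : Option (List (String × String)) :=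
  pvBestLoop (pvExchanges exchange) stock instruments (pvExchanges exchange).length none

-- ===== PRECONDITION & SPEC =====
-- Pre_ excludes instrument rows missing the "tradingsymbol" key, and rows whose
-- tradingsymbol equals the searched stock but which miss the "exchange" key: whenever
-- the Python scan inspects such a row it raises KeyError (rows after an early match
-- are never inspected, so Pre_ is slightly narrower than the exact crash set).
def Pre_instrument_row_py (instruments : List (List (String × String))) (stock : String)
    (exchange : Option String) : Prop :=
  ∀ row ∈ instruments, "tradingsymbol" ∈ row.map Prod.fst ∧
    (pvRowSym row = stock → "exchange" ∈ row.map Prod.fst)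

instance (instruments : List (List (String × String))) (stock : String) (exchange : Option String) : Decidable (Pre_instrument_row_py instruments stock exchange) := by unfold Pre_instrument_row_py; infer_instance

def pvWitness_instrument_row_py : (List (List (String × String))) × String × Option String :=
  ([[("tradingsymbol", "TCS"), ("exchange", "NSE")]], "TCS", none)

def Spec_instrument_row_py (instruments : List (List (String × String))) (stock : String) (exchange : Option String) (out : Option (List (String × String))) : Prop := out = instrument_row_py_alt instruments stock exchange
instance (instruments : List (List (String × String))) (stock : String) (exchange : Option String) (out : Option (List (String × String))) : Decidable (Spec_instrument_row_py instruments stock exchange out) := by unfold Spec_instrument_row_py; infer_instance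

-- ===== CLAIM (what is proved, stated in full; the proofs are below) =====
def Claim_equal_instrument_row_py : Prop := ∀ (instruments : List (List (String × String))) (stock : String) (exchange : Option String), Dom_instrument_row_py instruments stock exchange → Pre_instrument_row_py instruments stock exchange → Spec_instrument_row_py instruments stock exchange (instrument_row_py instruments stock exchange)

-- ===== LEMMAS AND PROOFS =====

-- one-pref case: the single pass with best_rank = 1 is exactly A's scan for that exchange
theorem bestLoop_single (e stock : String) (xs : List (List (String × String))) :
    pvBestLoop [e] stock xs 1 none = pvScanRows xs stock e := by
  induction xs with
  | nil => rfl
  | cons row rest ih =>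
      by_cases hs : pvRowSym row = stock
      · by_cases he : pvRowExch row = e
        · simp [pvBestLoop, pvScanRows, hs, he]
        · have he' : ¬ e = pvRowExch row := fun h => he h.symm
          simp [pvBestLoop, pvScanRows, hs, he, he', ih]
      · simp [pvBestLoop, pvScanRows, hs, ih]

-- after a BSE match (best_rank = 1, best = some b): only an NSE match can still win
theorem bestLoop_two_committed (stock : String) (xs : List (List (String × String)))
    (b : List (String × String)) :
    pvBestLoop ["NSE", "BSE"] stock xs 1 (some b)
      = match pvScanRows xs stock "NSE" with
        | some r => some r
        | none => some b := by
  induction xs with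
  | nil => rfl
  | cons row rest ih =>
      by_cases hs : pvRowSym row = stock
      · by_cases hn : pvRowExch row = "NSE"
        · have hix : List.idxOf? ("NSE" : String) ["NSE", "BSE"] = some 0 := rfl
          simp [pvBestLoop, pvScanRows, hs, hn, hix]
        · by_cases hb : pvRowExch row = "BSE"
          · have hix : List.idxOf? ("BSE" : String) ["NSE", "BSE"] = some 1 := rfl
            simp [pvBestLoop, pvScanRows, hs, hb, hix, ih]
          · have hix : List.idxOf? (pvRowExch row) ["NSE", "BSE"] = none := by
              rw [List.idxOf?_eq_none_iff]; simp [hn, hb]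
            simp [pvBestLoop, pvScanRows, hs, hn, hix, ih]
      · simp [pvBestLoop, pvScanRows, hs, ih]

-- fresh state (best_rank = 2, best = none): the single pass equals A's staged scans
theorem bestLoop_two (stock : String) (xs : List (List (String × String))) :
    pvBestLoop ["NSE", "BSE"] stock xs 2 none
      = match pvScanRows xs stock "NSE" with
        | some r => some r
        | none => pvScanRows xs stock "BSE" := by
  induction xs with
  | nil => rfl
  | cons row rest ih =>
      by_cases hs : pvRowSym row = stock
      · by_cases hn : pvRowExch row = "NSE"
        · have hix : List.idxOf? ("NSE" : String) ["NSE", "BSE"] = some 0 := rfl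
          simp [pvBestLoop, pvScanRows, hs, hn, hix]
        · by_cases hb : pvRowExch row = "BSE"
          · have hix : List.idxOf? ("BSE" : String) ["NSE", "BSE"] = some 1 := rfl
            simp [pvBestLoop, pvScanRows, hs, hb, hix,
                  bestLoop_two_committed stock rest row]
          · have hix : List.idxOf? (pvRowExch row) ["NSE", "BSE"] = none := by
              rw [List.idxOf?_eq_none_iff]; simp [hn, hb]
            simp [pvBestLoop, pvScanRows, hs, hn, hb, hix, ih]
      · simp [pvBestLoop, pvScanRows, hs, ih]

-- A's staged scan over one exchange equals the single pass started at best_rank = 1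
theorem staged_eq_best_one (e stock : String) (instruments : List (List (String × String))) :
    pvScanExchanges [e] instruments stock = pvBestLoop [e] stock instruments 1 none := by
  rw [bestLoop_single]
  unfold pvScanExchanges
  cases pvScanRows instruments stock e <;> rfl

-- A's staged scan over ["NSE", "BSE"] equals the single pass started at best_rank = 2
theorem staged_eq_best_two (stock : String) (instruments : List (List (String × String))) :
    pvScanExchanges ["NSE", "BSE"] instruments stock
      = pvBestLoop ["NSE", "BSE"] stock instruments 2 none := by
  rw [bestLoop_two]
  unfold pvScanExchanges
  cases pvScanRows instruments stock "NSE"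
  · unfold pvScanExchanges
    cases pvScanRows instruments stock "BSE" <;> rfl
  · rfl

-- ===== VERDICT (by name: the statement is the Claim_ definition above) =====
theorem instrument_row_py_spec : Claim_equal_instrument_row_py := by
  intro instruments stock exchange _ _
  unfold Spec_instrument_row_py instrument_row_py instrument_row_py_alt pvExchanges
  rcases exchange with _ | s
  · exact staged_eq_best_two stock instruments
  · by_cases h : s = ""
    · simp only [h]
      exact staged_eq_best_two stock instruments
    · simp only [beq_iff_eq, h, if_false]
      exact staged_eq_best_one s stock instruments
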